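-- pv_equiv track=rewrite | github.com/narenndhra/BrokenAuthAnalyzer | broken_auth_analyzer.py | _header_diff_summary
-- ===== SOURCE A (Python) =====
-- def _header_diff_summary(base_headers, mut_headers):
--     try:
--         def to_map(hs):
--             m = {}
--             for h in hs:
--                 parts = h.split(":",1)
--                 if len(parts) != 2: continue
--                 k = parts[0].strip().lower(); v = parts[1].strip()
--                 m[k] = v
--             return m
--         bm = to_map(base_headers or []); mm = to_map(mut_headers or [])
--         bset = set(bm.keys()); mset = set(mm.keys())
--         added = sorted(list(mset - bset))
--         removed = sorted(list(bset - mset))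
--         common = bset & mset
--         changed = sorted([k for k in common if bm.get(k,"") != mm.get(k,"")])
--
--         def cap(keys): return [k.title() for k in keys][:6]
--         chips = []
--         if added: chips.append("+" + ",".join(cap(added)))
--         if removed: chips.append("-" + ",".join(cap(removed)))
--         if changed: chips.append("~" + ",".join(cap(changed)))
--         summary = " ".join(chips) if chips else "-"
--         tip_lines = []
--         if added:
--             tip_lines.append("Added:");  [tip_lines.append("  %s: %s" % (k, mm.get(k,""))) for k in added]
--         if removed:
--             tip_lines.append("Removed:"); [tip_lines.append("  %s: %s" % (k, bm.get(k,""))) for k in removed]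
--         if changed:
--             tip_lines.append("Changed:")
--             for k in changed: tip_lines.append("  %s: '%s' -> '%s'" % (k, bm.get(k,""), mm.get(k,"")))
--         tooltip = "\n".join(tip_lines) if tip_lines else ""
--         return (summary, tooltip)
--     except:
--         return ("-", "")
-- ===== SOURCE B (Python) =====
-- def _header_diff_summary(base_headers, mut_headers):
--     # Collect (key, value) pairs with last-occurrence-wins by scanning in reverse
--     # with a seen-set (no dict), then sort by key.
--     def latest_items(hs):
--         seen, items = set(), []
--         for h in reversed(hs or []):
--             parts = h.split(":", 1)
--             if len(parts) != 2:
--                 continue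
--             k = parts[0].strip().lower()
--             if k in seen:
--                 continue
--             seen.add(k)
--             items.append((k, parts[1].strip()))
--         return sorted(items)
--
--     bi = latest_items(base_headers)
--     mi = latest_items(mut_headers)
--
--     # Single two-pointer merge of the two key-sorted item lists: each key is
--     # classified once, with its value(s) carried along, so no later lookups.
--     added, removed, changed = [], [], []
--     i = j = 0
--     while i < len(bi) or j < len(mi):
--         if j >= len(mi) or (i < len(bi) and bi[i][0] < mi[j][0]):
--             removed.append(bi[i]); i += 1
--         elif i >= len(bi) or mi[j][0] < bi[i][0]:
--             added.append(mi[j]); j += 1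
--         else:
--             if bi[i][1] != mi[j][1]:
--                 changed.append((bi[i][0], bi[i][1], mi[j][1]))
--             i += 1; j += 1
--
--     chips, tips = [], []
--     if added:
--         chips.append("+" + ",".join(k.title() for k, _ in added[:6]))
--         tips.append("Added:")
--         tips.extend("  %s: %s" % kv for kv in added)
--     if removed:
--         chips.append("-" + ",".join(k.title() for k, _ in removed[:6]))
--         tips.append("Removed:")
--         tips.extend("  %s: %s" % kv for kv in removed)
--     if changed:
--         chips.append("~" + ",".join(k.title() for k, _, _ in changed[:6]))
--         tips.append("Changed:")
--         tips.extend("  %s: '%s' -> '%s'" % t for t in changed)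
--     return (" ".join(chips) if chips else "-", "\n".join(tips))
-- ===== Notes on version B (the rewrite author's own statement) =====
-- stated objective: alternative
-- what changed: B never builds dicts or set differences: it collects last-wins (key,value) pairs by scanning each header list in reverse with a seen-set, sorts the two item lists once, and classifies every key in a single two-pointer merge of the sorted lists that carries the values along, so the chips and tooltip are formatted straight from the merged (key,value) tuples with no lookups.
import Mathlib
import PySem

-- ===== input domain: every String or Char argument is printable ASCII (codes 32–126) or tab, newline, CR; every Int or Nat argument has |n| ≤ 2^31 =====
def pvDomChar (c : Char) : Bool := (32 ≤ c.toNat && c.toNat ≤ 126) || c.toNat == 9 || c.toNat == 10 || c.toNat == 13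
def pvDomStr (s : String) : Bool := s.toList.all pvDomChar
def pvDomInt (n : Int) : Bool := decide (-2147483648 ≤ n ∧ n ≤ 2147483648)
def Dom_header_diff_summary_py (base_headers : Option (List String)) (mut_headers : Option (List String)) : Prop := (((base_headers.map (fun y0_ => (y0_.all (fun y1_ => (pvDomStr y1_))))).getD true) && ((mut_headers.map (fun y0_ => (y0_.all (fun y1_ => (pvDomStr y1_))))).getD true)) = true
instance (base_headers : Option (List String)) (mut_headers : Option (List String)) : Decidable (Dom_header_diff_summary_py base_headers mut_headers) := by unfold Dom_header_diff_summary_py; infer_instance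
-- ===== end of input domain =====

-- B replaces A's dict-driven set differences by a reversed-scan seen-set dedup into sorted
-- item lists and a single two-pointer merge that classifies each key once with its values
-- carried along (objective: alternative algorithm/data structure, no dict lookups after parsing).


-- ===== PORT A =====
-- Python str.title(), hand-ported (no PySem primitive): exact on ASCII — a letter following
-- a non-letter is uppercased, a letter following a letter is lowercased, others unchanged.
-- (Used by both ports, as both Pythons call the builtin str.title.)
def pyTitleChars : List Char → Bool → List Char
  | [], _ => []
  | c :: rest, prevCased =>
    let cased := PySem.Chars.isalpha c
    let c' := if cased then (if prevCased then PySem.Chars.lowerChar c else PySem.Chars.upperChar c) else c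
    c' :: pyTitleChars rest cased

def pyTitle (s : String) : String := String.ofList (pyTitleChars s.toList false)

-- A's to_map loop body: skip entries without ':', key = left part stripped+lowered
def pvToMapStep (m : PySem.Dict String String) (h : String) : PySem.Dict String String :=
  match PySem.Str.splitMax? h ":" 1 with
  | some [p0, p1] => m.insert (PySem.Str.lower (PySem.Str.strip p0)) (PySem.Str.strip p1)
  | _ => m

def pvToMap (hs : List String) : PySem.Dict String String :=
  hs.foldl pvToMapStep PySem.Dict.empty

-- on the given domain the Python bodies never raise, so A's bare-except path is dead code
def header_diff_summary_py (base_headers : Option (List String)) (mut_headers : Option (List String)) : String × String :=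
  let bm := pvToMap (base_headers.getD [])
  let mm := pvToMap (mut_headers.getD [])
  let bset : PySem.Set String := PySem.Set.ofList bm.keys
  let mset : PySem.Set String := PySem.Set.ofList mm.keys
  let added := PySem.List.sorted (PySem.Set.diff mset bset) (fun k => k) false
  let removed := PySem.List.sorted (PySem.Set.diff bset mset) (fun k => k) false
  let common := PySem.Set.inter bset mset
  let changed := PySem.List.sorted (common.filter (fun k => bm.getD k "" != mm.getD k "")) (fun k => k) false
  let cap := fun (keys : List String) => (keys.map pyTitle).take 6
  let chips : List String := []
  let chips := if added.isEmpty then chips else chips ++ ["+" ++ PySem.Str.join "," (cap added)]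
  let chips := if removed.isEmpty then chips else chips ++ ["-" ++ PySem.Str.join "," (cap removed)]
  let chips := if changed.isEmpty then chips else chips ++ ["~" ++ PySem.Str.join "," (cap changed)]
  let summary := if chips.isEmpty then "-" else PySem.Str.join " " chips
  let tip : List String := []
  let tip := if added.isEmpty then tip else tip ++ ["Added:"] ++ added.map (fun k => "  " ++ k ++ ": " ++ mm.getD k "")
  let tip := if removed.isEmpty then tip else tip ++ ["Removed:"] ++ removed.map (fun k => "  " ++ k ++ ": " ++ bm.getD k "")
  let tip := if changed.isEmpty then tip else tip ++ ["Changed:"] ++ changed.map (fun k => "  " ++ k ++ ": '" ++ bm.getD k "" ++ "' -> '" ++ mm.getD k "" ++ "'")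
  let tooltip := if tip.isEmpty then "" else PySem.Str.join "\n" tip
  (summary, tooltip)

-- ===== PORT B =====
-- B's reversed-scan dedup: first occurrence in the reversed list = last occurrence wins,
-- tracked with a seen-set; then sort the collected (key, value) items by key.
def pvLatestStep (st : PySem.Set String × List (String × String)) (h : String) :
    PySem.Set String × List (String × String) :=
  match PySem.Str.splitMax? h ":" 1 with
  | some [p0, p1] =>
    let k := PySem.Str.lower (PySem.Str.strip p0)
    if PySem.Set.contains st.1 k then st
    else (PySem.Set.add st.1 k, st.2 ++ [(k, PySem.Str.strip p1)])
  | _ => st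

def pvLatestItems (hs : List String) : List (String × String) :=
  let st := hs.reverse.foldl pvLatestStep (PySem.Set.empty, [])
  PySem.List.sorted st.2 (fun p => p.1) false

-- B's two-pointer merge of the two key-sorted item lists (the while loop, as the obvious
-- structural recursion on the two suffixes; Python's appends become prepends to the recursive result)
def pvMerge : List (String × String) → List (String × String) →
    List (String × String) × List (String × String) × List (String × String × String)
  | [], [] => ([], [], [])
  | [], m :: mt =>
    let r := pvMerge [] mt
    (m :: r.1, r.2.1, r.2.2)
  | b :: bt, [] =>
    let r := pvMerge bt []
    (r.1, b :: r.2.1, r.2.2)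
  | b :: bt, m :: mt =>
    if b.1 < m.1 then
      let r := pvMerge bt (m :: mt)
      (r.1, b :: r.2.1, r.2.2)
    else if m.1 < b.1 then
      let r := pvMerge (b :: bt) mt
      (m :: r.1, r.2.1, r.2.2)
    else
      let r := pvMerge bt mt
      (r.1, r.2.1, if b.2 != m.2 then (b.1, b.2, m.2) :: r.2.2 else r.2.2)
termination_by lb lm => lb.length + lm.length

def header_diff_summary_py_alt (base_headers : Option (List String)) (mut_headers : Option (List String)) : String × String :=
  let bi := pvLatestItems (base_headers.getD [])
  let mi := pvLatestItems (mut_headers.getD [])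
  let r := pvMerge bi mi
  let added := r.1
  let removed := r.2.1
  let changed := r.2.2
  let chips : List String := []
  let chips := if added.isEmpty then chips else chips ++ ["+" ++ PySem.Str.join "," ((added.take 6).map (fun p => pyTitle p.1))]
  let chips := if removed.isEmpty then chips else chips ++ ["-" ++ PySem.Str.join "," ((removed.take 6).map (fun p => pyTitle p.1))]
  let chips := if changed.isEmpty then chips else chips ++ ["~" ++ PySem.Str.join "," ((changed.take 6).map (fun t => pyTitle t.1))]
  let tips : List String := []
  let tips := if added.isEmpty then tips else tips ++ ["Added:"] ++ added.map (fun p => "  " ++ p.1 ++ ": " ++ p.2)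
  let tips := if removed.isEmpty then tips else tips ++ ["Removed:"] ++ removed.map (fun p => "  " ++ p.1 ++ ": " ++ p.2)
  let tips := if changed.isEmpty then tips else tips ++ ["Changed:"] ++ changed.map (fun t => "  " ++ t.1 ++ ": '" ++ t.2.1 ++ "' -> '" ++ t.2.2 ++ "'")
  (if chips.isEmpty then "-" else PySem.Str.join " " chips, PySem.Str.join "\n" tips)

-- ===== PRECONDITION & SPEC =====
def Spec_header_diff_summary_py (base_headers : Option (List String)) (mut_headers : Option (List String)) (out : String × String) : Prop := out = header_diff_summary_py_alt base_headers mut_headers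
instance (base_headers : Option (List String)) (mut_headers : Option (List String)) (out : String × String) : Decidable (Spec_header_diff_summary_py base_headers mut_headers out) := by unfold Spec_header_diff_summary_py; infer_instance

-- ===== CLAIM (what is proved, stated in full; the proofs are below) =====
def Claim_equal_header_diff_summary_py : Prop := ∀ (base_headers : Option (List String)) (mut_headers : Option (List String)), Dom_header_diff_summary_py base_headers mut_headers → Spec_header_diff_summary_py base_headers mut_headers (header_diff_summary_py base_headers mut_headers)

-- ===== LEMMAS AND PROOFS =====

def pvChg (lm : List (String × String)) (p : String × String) : Option (String × String × String) :=
  match lm.find? (fun q => q.1 == p.1) with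
  | some q => if p.2 != q.2 then some (p.1, p.2, q.2) else none
  | none => none

lemma pvToMapStep_get? (d : PySem.Dict String String) (h : String) (x : String) :
    (pvToMapStep d h).get? x = ((pvToMapStep PySem.Dict.empty h).get? x).or (d.get? x) := by
  unfold pvToMapStep
  cases hsp : PySem.Str.splitMax? h ":" 1 with
  | none => simp [PySem.Dict.get?_empty]
  | some l =>
    match l with
    | [] => simp [PySem.Dict.get?_empty]
    | [p] => simp [PySem.Dict.get?_empty]
    | [p0, p1] =>
      by_cases hx : x = PySem.Str.lower (PySem.Str.strip p0)
      · subst hx; simp [PySem.Dict.get?_insert_self]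
      · simp [PySem.Dict.get?_insert_of_ne _ _ hx, PySem.Dict.get?_empty]
    | p0 :: p1 :: p2 :: r => simp [PySem.Dict.get?_empty]

lemma pvToMap_from (t : List String) (d : PySem.Dict String String) (x : String) :
    (t.foldl pvToMapStep d).get? x = ((pvToMap t).get? x).or (d.get? x) := by
  induction t generalizing d with
  | nil => simp [pvToMap, PySem.Dict.get?_empty]
  | cons h t ih =>
    show ((h :: t).foldl pvToMapStep d).get? x = _
    simp only [List.foldl_cons]
    rw [ih (pvToMapStep d h), pvToMapStep_get? d h x, ← Option.or_assoc]
    congr 1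
    have : (pvToMap (h :: t)).get? x = ((pvToMap t).get? x).or ((pvToMapStep PySem.Dict.empty h).get? x) := by
      show ((h :: t).foldl pvToMapStep PySem.Dict.empty).get? x = _
      simp only [List.foldl_cons]
      exact ih (pvToMapStep PySem.Dict.empty h)
    rw [this]

lemma pvToMap_cons (h : String) (t : List String) (x : String) :
    (pvToMap (h :: t)).get? x = ((pvToMap t).get? x).or ((pvToMapStep PySem.Dict.empty h).get? x) := by
  show ((h :: t).foldl pvToMapStep PySem.Dict.empty).get? x = _
  simp only [List.foldl_cons]
  exact pvToMap_from t _ x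

lemma pvLatest_inv (hs : List String) :
    (∀ x, PySem.Set.contains (hs.reverse.foldl pvLatestStep (PySem.Set.empty, [])).1 x = true ↔
        x ∈ (hs.reverse.foldl pvLatestStep (PySem.Set.empty, [])).2.map Prod.fst) ∧
    ((hs.reverse.foldl pvLatestStep (PySem.Set.empty, [])).2.map Prod.fst).Nodup ∧
    (∀ k v, (k, v) ∈ (hs.reverse.foldl pvLatestStep (PySem.Set.empty, [])).2 ↔
        (pvToMap hs).get? k = some v) := by
  induction hs with
  | nil =>
    refine ⟨fun x => ?_, by simp, fun k v => ?_⟩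
    · simp [PySem.Set.empty, PySem.Set.contains]
    · simp [pvToMap, PySem.Dict.get?_empty]
  | cons h t ih =>
    obtain ⟨ha, hb, hc⟩ := ih
    have hfold : (h :: t).reverse.foldl pvLatestStep (PySem.Set.empty, [])
        = pvLatestStep (t.reverse.foldl pvLatestStep (PySem.Set.empty, [])) h := by
      rw [List.reverse_cons, List.foldl_append, List.foldl_cons, List.foldl_nil]
    set st := t.reverse.foldl pvLatestStep (PySem.Set.empty, []) with hst
    rw [hfold]
    simp only [pvLatestStep]
    cases hsp : PySem.Str.splitMax? h ":" 1 with
    | none =>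
      simp only [hsp]
      refine ⟨ha, hb, fun k v => ?_⟩
      rw [hc k v, pvToMap_cons h t k]
      unfold pvToMapStep
      simp [hsp, PySem.Dict.get?_empty]
    | some l =>
      have hget : ∀ k, (pvToMap (h :: t)).get? k
          = ((pvToMap t).get? k).or ((pvToMapStep PySem.Dict.empty h).get? k) := fun k => pvToMap_cons h t k
      match l with
      | [] =>
        simp only [hsp]
        refine ⟨ha, hb, fun k v => ?_⟩
        rw [hc k v, hget k]; unfold pvToMapStep; simp [hsp, PySem.Dict.get?_empty]
      | [p] =>
        simp only [hsp]
        refine ⟨ha, hb, fun k v => ?_⟩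
        rw [hc k v, hget k]; unfold pvToMapStep; simp [hsp, PySem.Dict.get?_empty]
      | p0 :: p1 :: p2 :: rest =>
        simp only [hsp]
        refine ⟨ha, hb, fun k v => ?_⟩
        rw [hc k v, hget k]; unfold pvToMapStep; simp [hsp, PySem.Dict.get?_empty]
      | [p0, p1] =>
        simp only [hsp]
        set kh := PySem.Str.lower (PySem.Str.strip p0) with hkh
        set vh := PySem.Str.strip p1 with hvh
        have hstep : ∀ k, (pvToMapStep PySem.Dict.empty h).get? k
            = if k = kh then some vh else none := by
          intro k
          unfold pvToMapStep
          simp only [hsp]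
          rw [← hkh, ← hvh]
          by_cases hk : k = kh
          · subst hk; simp [PySem.Dict.get?_insert_self]
          · simp [hk, PySem.Dict.get?_insert_of_ne _ _ hk, PySem.Dict.get?_empty]
        by_cases hcont : PySem.Set.contains st.1 kh = true
        · simp only [hcont, if_true]
          have hkmem : kh ∈ st.2.map Prod.fst := (ha kh).mp hcont
          obtain ⟨⟨pk, pv⟩, hp, hpk⟩ := List.mem_map.mp hkmem
          simp only at hpk
          rw [hpk] at hp
          have hw : (pvToMap t).get? kh = some pv := (hc kh pv).mp hp
          refine ⟨ha, hb, fun k v => ?_⟩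
          rw [hc k v, hget k, hstep k]
          by_cases hk : k = kh
          · subst hk; rw [hw]; simp
          · simp [hk]
        · simp only [hcont, if_false, Bool.false_eq_true]
          have hknot : kh ∉ st.2.map Prod.fst := fun hm => hcont ((ha kh).mpr hm)
          have hnone : (pvToMap t).get? kh = none := by
            cases hgt : (pvToMap t).get? kh with
            | none => rfl
            | some w =>
              exact absurd (List.mem_map.mpr ⟨(kh, w), (hc kh w).mpr hgt, rfl⟩) hknot
          refine ⟨fun x => ?_, ?_, fun k v => ?_⟩
          · rw [PySem.Set.contains_iff, PySem.Set.mem_add, List.map_append, List.mem_append]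
            constructor
            · rintro (hx | rfl)
              · exact Or.inl ((ha x).mp ((PySem.Set.contains_iff _ _).mpr hx))
              · exact Or.inr (by simp)
            · rintro (hx | hx)
              · exact Or.inl ((PySem.Set.contains_iff _ _).mp ((ha x).mpr hx))
              · exact Or.inr (by simpa using hx)
          · rw [List.map_append]
            simp only [List.map_cons, List.map_nil]
            exact List.Nodup.append hb (List.nodup_singleton _) (by simpa using hknot)
          · rw [List.mem_append, hc k v, hget k, hstep k]
            by_cases hk : k = kh
            · subst hk
              have hif : (if kh = kh then some vh else none) = some vh := by simp
              rw [hnone, hif]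
              simp [eq_comm]
            · simp [hk]

-- pairwise ≤ with distinct keys is pairwise <
lemma pvStrict {α κ : Type} [LinearOrder κ] (key : α → κ) {l : List α}
    (h1 : l.Pairwise (fun a b => key a ≤ key b)) (h2 : (l.map key).Nodup) :
    l.Pairwise (fun a b => key a < key b) := by
  have h2' : l.Pairwise (fun a b => key a ≠ key b) := List.pairwise_map.mp h2
  exact (h1.and h2').imp (fun h => lt_of_le_of_ne h.1 h.2)

lemma pvLatestItems_mem (hs : List String) (k v : String) :
    (k, v) ∈ pvLatestItems hs ↔ (pvToMap hs).get? k = some v := by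
  unfold pvLatestItems
  rw [PySem.List.mem_sorted]
  exact (pvLatest_inv hs).2.2 k v

lemma pvLatestItems_pairwise (hs : List String) :
    (pvLatestItems hs).Pairwise (fun a b => a.1 < b.1) := by
  unfold pvLatestItems
  refine pvStrict (fun (p : String × String) => p.1) (PySem.List.sorted_pairwise _ _) ?_
  have hperm := (PySem.List.sorted_perm ((hs.reverse.foldl pvLatestStep (PySem.Set.empty, [])).2) (fun p => p.1) false).map Prod.fst
  exact hperm.nodup_iff.mpr (pvLatest_inv hs).2.1

lemma pvFindUnique {α : Type} (p : α → Bool) (a : α) (l : List α)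
    (ha : a ∈ l) (hp : p a = true) (hu : ∀ x ∈ l, p x = true → x = a) :
    l.find? p = some a := by
  induction l with
  | nil => cases ha
  | cons x t ih =>
    by_cases hx : p x = true
    · rw [List.find?_cons_of_pos hx]
      exact congrArg some (hu x (List.mem_cons_self) hx)
    · rw [List.find?_cons_of_neg hx]
      have hat : a ∈ t := by
        rcases List.mem_cons.mp ha with rfl | hat
        · exact absurd hp hx
        · exact hat
      exact ih hat (fun y hy => hu y (List.mem_cons_of_mem _ hy))

lemma pvFind_eq (hs : List String) (k : String) :
    (pvLatestItems hs).find? (fun q => q.1 == k) = ((pvToMap hs).get? k).map (fun v => (k, v)) := by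
  cases hg : (pvToMap hs).get? k with
  | none =>
    rw [Option.map_none]
    rw [List.find?_eq_none]
    rintro ⟨qk, qv⟩ hq hpq
    simp only [beq_iff_eq] at hpq
    subst hpq
    rw [pvLatestItems_mem] at hq
    rw [hg] at hq
    cases hq
  | some v =>
    rw [Option.map_some]
    refine pvFindUnique _ _ _ ((pvLatestItems_mem hs k v).mpr hg) (by simp) ?_
    rintro ⟨qk, qv⟩ hq hpq
    simp only [beq_iff_eq] at hpq
    subst hpq
    rw [pvLatestItems_mem, hg] at hq
    injection hq with hq
    rw [hq]

lemma pvMerge_spec (lb lm : List (String × String))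
    (hb : lb.Pairwise (fun a b => a.1 < b.1)) (hm : lm.Pairwise (fun a b => a.1 < b.1)) :
    pvMerge lb lm =
      (lm.filter (fun p => !(lb.map Prod.fst).contains p.1),
       lb.filter (fun p => !(lm.map Prod.fst).contains p.1),
       lb.filterMap (pvChg lm)) := by
  induction lb, lm using pvMerge.induct with
  | case1 => simp [pvMerge]
  | case2 m mt ih =>
    rw [pvMerge]
    rw [ih List.Pairwise.nil (hm.sublist (List.sublist_cons_self m mt))]
    simp
  | case3 b bt ih =>
    rw [pvMerge]
    rw [ih (hb.sublist (List.sublist_cons_self b bt)) List.Pairwise.nil]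
    simp [pvChg]
  | case4 b bt m mt hlt ih =>
    rw [pvMerge]
    simp only [hlt, if_true]
    rw [ih (hb.sublist (List.sublist_cons_self b bt)) hm]
    have hmk : ∀ p ∈ m :: mt, m.1 ≤ p.1 := by
      intro p hp
      rcases List.mem_cons.mp hp with rfl | hp
      · exact le_refl _
      · exact le_of_lt (List.rel_of_pairwise_cons hm hp)
    have hfa : (m :: mt).filter (fun p => !((b :: bt).map Prod.fst).contains p.1)
        = (m :: mt).filter (fun p => !(bt.map Prod.fst).contains p.1) := by
      refine List.filter_congr ?_
      intro p hp
      have : p.1 ≠ b.1 := fun h => absurd (h ▸ hmk p hp) (not_le.mpr hlt)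
      simp [this]
    have hbnot : ((m :: mt).map Prod.fst).contains b.1 = false := by
      rw [List.contains_eq_any_beq]
      simp only [List.any_eq_false]
      rintro x hx
      obtain ⟨q, hq, rfl⟩ := List.mem_map.mp hx
      have := hmk q hq
      simp only [beq_iff_eq]
      exact fun h => absurd (h ▸ this) (not_le.mpr hlt)
    have hchg : pvChg (m :: mt) b = none := by
      unfold pvChg
      have : (m :: mt).find? (fun q => q.1 == b.1) = none := by
        rw [List.find?_eq_none]
        intro q hq
        simp only [beq_iff_eq]
        exact fun h => absurd (h ▸ hmk q hq) (not_le.mpr hlt)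
      rw [this]
    have hpos : (!((m :: mt).map Prod.fst).contains b.1) = true := by rw [hbnot]; rfl
    have hrm : List.filter (fun p => !((m :: mt).map Prod.fst).contains p.1) (b :: bt)
        = b :: List.filter (fun p => !((m :: mt).map Prod.fst).contains p.1) bt :=
      List.filter_cons_of_pos hpos
    rw [hfa, hrm, List.filterMap_cons_none hchg]
  | case5 b bt m mt hnlt hlt ih =>
    rw [pvMerge]
    simp only [hnlt, hlt, if_true, if_false]
    rw [ih hb (hm.sublist (List.sublist_cons_self m mt))]
    have hbk : ∀ p ∈ b :: bt, b.1 ≤ p.1 := by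
      intro p hp
      rcases List.mem_cons.mp hp with rfl | hp
      · exact le_refl _
      · exact le_of_lt (List.rel_of_pairwise_cons hb hp)
    have hfr : (b :: bt).filter (fun p => !((m :: mt).map Prod.fst).contains p.1)
        = (b :: bt).filter (fun p => !(mt.map Prod.fst).contains p.1) := by
      refine List.filter_congr ?_
      intro p hp
      have : p.1 ≠ m.1 := fun h => absurd (h ▸ hbk p hp) (not_le.mpr hlt)
      simp [this]
    have hmnot : ((b :: bt).map Prod.fst).contains m.1 = false := by
      rw [List.contains_eq_any_beq]
      simp only [List.any_eq_false]
      rintro x hx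
      obtain ⟨q, hq, rfl⟩ := List.mem_map.mp hx
      have := hbk q hq
      simp only [beq_iff_eq]
      exact fun h => absurd (h ▸ this) (not_le.mpr hlt)
    have hchg : ∀ p ∈ b :: bt, pvChg (m :: mt) p = pvChg mt p := by
      intro p hp
      unfold pvChg
      have : (m :: mt).find? (fun q => q.1 == p.1) = mt.find? (fun q => q.1 == p.1) := by
        rw [List.find?_cons_of_neg]
        simp only [beq_iff_eq]
        exact fun h => absurd (h ▸ hbk p hp) (not_le.mpr hlt)
      rw [this]
    have hpos : (!((b :: bt).map Prod.fst).contains m.1) = true := by rw [hmnot]; rfl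
    have had : List.filter (fun p => !((b :: bt).map Prod.fst).contains p.1) (m :: mt)
        = m :: List.filter (fun p => !((b :: bt).map Prod.fst).contains p.1) mt :=
      List.filter_cons_of_pos hpos
    rw [hfr, List.filterMap_congr (fun x hx => (hchg x hx).symm), had]
  | case6 b bt m mt hnlt hnlt' ih =>
    have heq : b.1 = m.1 := le_antisymm (not_lt.mp hnlt') (not_lt.mp hnlt)
    rw [pvMerge]
    simp only [hnlt, hnlt', if_false]
    rw [ih (hb.sublist (List.sublist_cons_self b bt)) (hm.sublist (List.sublist_cons_self m mt))]
    have hbk : ∀ p ∈ bt, b.1 < p.1 := fun p hp => List.rel_of_pairwise_cons hb hp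
    have hmk : ∀ p ∈ mt, m.1 < p.1 := fun p hp => List.rel_of_pairwise_cons hm hp
    have hfa : (m :: mt).filter (fun p => !((b :: bt).map Prod.fst).contains p.1)
        = mt.filter (fun p => !(bt.map Prod.fst).contains p.1) := by
      rw [List.filter_cons]
      have hmem : ((b :: bt).map Prod.fst).contains m.1 = true := by
        simp [heq.symm]
      rw [hmem]
      simp only [Bool.not_true]
      refine List.filter_congr ?_
      intro p hp
      have : p.1 ≠ b.1 := fun h => absurd (heq ▸ h ▸ hmk p hp) (lt_irrefl _)
      simp [this]
    have hfr : (b :: bt).filter (fun p => !((m :: mt).map Prod.fst).contains p.1)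
        = bt.filter (fun p => !(mt.map Prod.fst).contains p.1) := by
      rw [List.filter_cons]
      have hmem : ((m :: mt).map Prod.fst).contains b.1 = true := by
        simp [heq]
      rw [hmem]
      simp only [Bool.not_true]
      refine List.filter_congr ?_
      intro p hp
      have : p.1 ≠ m.1 := fun h => absurd (h ▸ heq ▸ hbk p hp) (lt_irrefl _)
      simp [this]
    have hchg : (b :: bt).filterMap (pvChg (m :: mt))
        = (if b.2 != m.2 then (b.1, b.2, m.2) :: bt.filterMap (pvChg mt) else bt.filterMap (pvChg mt)) := by
      have hfind : (m :: mt).find? (fun q => q.1 == b.1) = some m := by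
        rw [List.find?_cons_of_pos]
        simp [heq]
      have hcong : bt.filterMap (pvChg (m :: mt)) = bt.filterMap (pvChg mt) := by
        refine List.filterMap_congr ?_
        intro p hp
        unfold pvChg
        rw [List.find?_cons_of_neg]
        simp only [beq_iff_eq]
        exact fun h => absurd (h ▸ heq ▸ hbk p hp) (lt_irrefl _)
      have hpv : pvChg (m :: mt) b = if (b.2 != m.2) = true then some (b.1, b.2, m.2) else none := by
        unfold pvChg
        rw [hfind]
      rw [List.filterMap_cons, hpv, hcong]
      by_cases hv : (b.2 != m.2) = true
      · simp [hv]
      · simp [hv]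
    rw [hfa, hfr, hchg]

lemma pvEqOfPerm {α κ : Type} [LinearOrder κ] (key : α → κ) {l₁ l₂ : List α}
    (h : l₁.Perm l₂) (h1 : l₁.Pairwise (fun a b => key a < key b))
    (h2 : l₂.Pairwise (fun a b => key a < key b)) : l₁ = l₂ := by
  refine List.Perm.eq_of_pairwise (le := fun a b => key a < key b) ?_ h1 h2 h
  intro a b _ _ hab hba
  exact absurd (hab.trans hba) (lt_irrefl _)

-- membership in the item list's key column is membership in the dict's keys
lemma pvMemFst (hs : List String) (k : String) :
    k ∈ (pvLatestItems hs).map Prod.fst ↔ k ∈ (pvToMap hs).keys := by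
  constructor
  · intro hk
    obtain ⟨⟨pk, pv⟩, hp, hpk⟩ := List.mem_map.mp hk
    simp only at hpk
    subst hpk
    have := (pvLatestItems_mem hs pk pv).mp hp
    by_contra hnk
    rw [(PySem.Dict.get?_eq_none_iff_not_mem_keys _ _).mpr hnk] at this
    cases this
  · intro hk
    cases hg : (pvToMap hs).get? k with
    | none => exact absurd ((PySem.Dict.get?_eq_none_iff_not_mem_keys _ _).mp hg) (not_not.mpr hk)
    | some v => exact List.mem_map.mpr ⟨(k, v), (pvLatestItems_mem hs k v).mpr hg, rfl⟩

lemma pvGetSome_iff (hs : List String) (k v : String) :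
    (pvToMap hs).get? k = some v ↔ k ∈ (pvToMap hs).keys ∧ (pvToMap hs).getD k "" = v := by
  constructor
  · intro hg
    refine ⟨?_, PySem.Dict.getD_of_get?_eq_some _ _ hg⟩
    by_contra hnk
    rw [(PySem.Dict.get?_eq_none_iff_not_mem_keys _ _).mpr hnk] at hg
    cases hg
  · rintro ⟨hk, hd⟩
    cases hg : (pvToMap hs).get? k with
    | none => exact absurd ((PySem.Dict.get?_eq_none_iff_not_mem_keys _ _).mp hg) (not_not.mpr hk)
    | some w =>
      have := PySem.Dict.getD_of_get?_eq_some (pvToMap hs) (k := k) (v := w) "" hg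
      rw [this] at hd
      rw [hd]

lemma pvPairwiseNodup {α κ : Type} [LinearOrder κ] (key : α → κ) {l : List α}
    (h : l.Pairwise (fun a b => key a < key b)) : l.Nodup :=
  h.imp (fun hab => fun he => absurd (he ▸ hab) (lt_irrefl _))

lemma pvSortedKeysStrict (s : PySem.Set String) (hnd : s.Nodup) :
    (PySem.List.sorted s (fun k => k) false).Pairwise (fun a b => a < b) := by
  refine pvStrict (fun k => k) (PySem.List.sorted_pairwise _ _) ?_
  rw [List.map_id']
  exact (PySem.List.sorted_perm s (fun k => k) false).nodup_iff.mpr hnd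

lemma pvComp_added (bhs mhs : List String) :
    (pvLatestItems mhs).filter (fun p => !((pvLatestItems bhs).map Prod.fst).contains p.1)
    = (PySem.List.sorted (PySem.Set.diff (PySem.Set.ofList (pvToMap mhs).keys) (PySem.Set.ofList (pvToMap bhs).keys)) (fun k => k) false).map
        (fun k => (k, (pvToMap mhs).getD k "")) := by
  have hL : ((pvLatestItems mhs).filter (fun p => !((pvLatestItems bhs).map Prod.fst).contains p.1)).Pairwise
      (fun a b => a.1 < b.1) := (pvLatestItems_pairwise mhs).sublist List.filter_sublist
  have hRk : (PySem.List.sorted (PySem.Set.diff (PySem.Set.ofList (pvToMap mhs).keys) (PySem.Set.ofList (pvToMap bhs).keys)) (fun k => k) false).Pairwise (fun a b => a < b) :=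
    pvSortedKeysStrict _ (PySem.Set.nodup_diff _ _ (PySem.Set.nodup_ofList _))
  have hR : ((PySem.List.sorted (PySem.Set.diff (PySem.Set.ofList (pvToMap mhs).keys) (PySem.Set.ofList (pvToMap bhs).keys)) (fun k => k) false).map
      (fun k => (k, (pvToMap mhs).getD k ""))).Pairwise (fun a b => a.1 < b.1) :=
    List.pairwise_map.mpr hRk
  refine pvEqOfPerm Prod.fst ?_ hL hR
  rw [List.perm_ext_iff_of_nodup (pvPairwiseNodup _ hL) (pvPairwiseNodup _ hR)]
  rintro ⟨k, v⟩
  rw [List.mem_filter, List.mem_map]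
  constructor
  · rintro ⟨hm, hpred⟩
    have hg := (pvLatestItems_mem mhs k v).mp hm
    have hnotb : k ∉ (pvToMap bhs).keys := by
      intro hkb
      have : k ∈ (pvLatestItems bhs).map Prod.fst := (pvMemFst bhs k).mpr hkb
      simp only [Bool.not_eq_true'] at hpred
      rw [List.contains_eq_any_beq] at hpred
      simp only [List.any_eq_false, beq_iff_eq] at hpred
      exact hpred k this rfl
    obtain ⟨hkm, hd⟩ := (pvGetSome_iff mhs k v).mp hg
    refine ⟨k, ?_, by rw [hd]⟩
    rw [PySem.List.mem_sorted, PySem.Set.mem_diff, PySem.Set.mem_ofList, PySem.Set.mem_ofList]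
    exact ⟨hkm, hnotb⟩
  · rintro ⟨k', hk', hkv⟩
    cases hkv
    rw [PySem.List.mem_sorted, PySem.Set.mem_diff, PySem.Set.mem_ofList, PySem.Set.mem_ofList] at hk'
    obtain ⟨hkm, hnotb⟩ := hk'
    refine ⟨(pvLatestItems_mem mhs k _).mpr ((pvGetSome_iff mhs k _).mpr ⟨hkm, rfl⟩), ?_⟩
    simp only [Bool.not_eq_true']
    rw [List.contains_eq_any_beq]
    simp only [List.any_eq_false, beq_iff_eq]
    intro x hx hxk
    exact hnotb ((pvMemFst bhs k).mp (hxk ▸ hx))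

lemma pvComp_removed (bhs mhs : List String) :
    (pvLatestItems bhs).filter (fun p => !((pvLatestItems mhs).map Prod.fst).contains p.1)
    = (PySem.List.sorted (PySem.Set.diff (PySem.Set.ofList (pvToMap bhs).keys) (PySem.Set.ofList (pvToMap mhs).keys)) (fun k => k) false).map
        (fun k => (k, (pvToMap bhs).getD k "")) := by
  have hL : ((pvLatestItems bhs).filter (fun p => !((pvLatestItems mhs).map Prod.fst).contains p.1)).Pairwise
      (fun a b => a.1 < b.1) := (pvLatestItems_pairwise bhs).sublist List.filter_sublist
  have hRk : (PySem.List.sorted (PySem.Set.diff (PySem.Set.ofList (pvToMap bhs).keys) (PySem.Set.ofList (pvToMap mhs).keys)) (fun k => k) false).Pairwise (fun a b => a < b) :=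
    pvSortedKeysStrict _ (PySem.Set.nodup_diff _ _ (PySem.Set.nodup_ofList _))
  have hR : ((PySem.List.sorted (PySem.Set.diff (PySem.Set.ofList (pvToMap bhs).keys) (PySem.Set.ofList (pvToMap mhs).keys)) (fun k => k) false).map
      (fun k => (k, (pvToMap bhs).getD k ""))).Pairwise (fun a b => a.1 < b.1) :=
    List.pairwise_map.mpr hRk
  refine pvEqOfPerm Prod.fst ?_ hL hR
  rw [List.perm_ext_iff_of_nodup (pvPairwiseNodup _ hL) (pvPairwiseNodup _ hR)]
  rintro ⟨k, v⟩
  rw [List.mem_filter, List.mem_map]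
  constructor
  · rintro ⟨hm, hpred⟩
    have hg := (pvLatestItems_mem bhs k v).mp hm
    have hnotm : k ∉ (pvToMap mhs).keys := by
      intro hkm
      have : k ∈ (pvLatestItems mhs).map Prod.fst := (pvMemFst mhs k).mpr hkm
      simp only [Bool.not_eq_true'] at hpred
      rw [List.contains_eq_any_beq] at hpred
      simp only [List.any_eq_false, beq_iff_eq] at hpred
      exact hpred k this rfl
    obtain ⟨hkb, hd⟩ := (pvGetSome_iff bhs k v).mp hg
    refine ⟨k, ?_, by rw [hd]⟩
    rw [PySem.List.mem_sorted, PySem.Set.mem_diff, PySem.Set.mem_ofList, PySem.Set.mem_ofList]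
    exact ⟨hkb, hnotm⟩
  · rintro ⟨k', hk', hkv⟩
    cases hkv
    rw [PySem.List.mem_sorted, PySem.Set.mem_diff, PySem.Set.mem_ofList, PySem.Set.mem_ofList] at hk'
    obtain ⟨hkb, hnotm⟩ := hk'
    refine ⟨(pvLatestItems_mem bhs k _).mpr ((pvGetSome_iff bhs k _).mpr ⟨hkb, rfl⟩), ?_⟩
    simp only [Bool.not_eq_true']
    rw [List.contains_eq_any_beq]
    simp only [List.any_eq_false, beq_iff_eq]
    intro x hx hxk
    exact hnotm ((pvMemFst mhs k).mp (hxk ▸ hx))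

lemma pvComp_changed (bhs mhs : List String) :
    (pvLatestItems bhs).filterMap (pvChg (pvLatestItems mhs))
    = (PySem.List.sorted ((PySem.Set.inter (PySem.Set.ofList (pvToMap bhs).keys) (PySem.Set.ofList (pvToMap mhs).keys)).filter
          (fun k => (pvToMap bhs).getD k "" != (pvToMap mhs).getD k "")) (fun k => k) false).map
        (fun k => (k, (pvToMap bhs).getD k "", (pvToMap mhs).getD k "")) := by
  have hchg1 : ∀ p x, pvChg (pvLatestItems mhs) p = some x → x.1 = p.1 := by
    intro p x hx
    unfold pvChg at hx
    rw [pvFind_eq mhs p.1] at hx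
    cases hg : (pvToMap mhs).get? p.1 with
    | none => rw [hg] at hx; cases hx
    | some w =>
      rw [hg] at hx
      simp only [Option.map_some] at hx
      by_cases hv : (p.2 != w) = true
      · rw [if_pos hv] at hx; injection hx with hx; rw [← hx]
      · rw [if_neg hv] at hx; cases hx
  have hL : ((pvLatestItems bhs).filterMap (pvChg (pvLatestItems mhs))).Pairwise
      (fun a b => a.1 < b.1) := by
    rw [List.pairwise_filterMap]
    refine (pvLatestItems_pairwise bhs).imp ?_
    intro a b hab x hx y hy
    rw [hchg1 a x hx, hchg1 b y hy]
    exact hab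
  have hRk : (PySem.List.sorted ((PySem.Set.inter (PySem.Set.ofList (pvToMap bhs).keys) (PySem.Set.ofList (pvToMap mhs).keys)).filter
        (fun k => (pvToMap bhs).getD k "" != (pvToMap mhs).getD k "")) (fun k => k) false).Pairwise (fun a b => a < b) :=
    pvSortedKeysStrict _ (List.Nodup.filter _ (PySem.Set.nodup_inter _ _ (PySem.Set.nodup_ofList _)))
  have hR : ((PySem.List.sorted ((PySem.Set.inter (PySem.Set.ofList (pvToMap bhs).keys) (PySem.Set.ofList (pvToMap mhs).keys)).filter
        (fun k => (pvToMap bhs).getD k "" != (pvToMap mhs).getD k "")) (fun k => k) false).map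
      (fun k => (k, (pvToMap bhs).getD k "", (pvToMap mhs).getD k ""))).Pairwise (fun a b => a.1 < b.1) :=
    List.pairwise_map.mpr hRk
  refine pvEqOfPerm Prod.fst ?_ hL hR
  rw [List.perm_ext_iff_of_nodup (pvPairwiseNodup _ hL) (pvPairwiseNodup _ hR)]
  rintro ⟨k, bv, mv⟩
  rw [List.mem_filterMap, List.mem_map]
  constructor
  · rintro ⟨⟨pk, pv⟩, hp, hpc⟩
    have hgb := (pvLatestItems_mem bhs pk pv).mp hp
    unfold pvChg at hpc
    rw [pvFind_eq mhs pk] at hpc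
    cases hg : (pvToMap mhs).get? pk with
    | none => rw [hg] at hpc; cases hpc
    | some w =>
      rw [hg] at hpc
      simp only [Option.map_some] at hpc
      by_cases hv : (pv != w) = true
      · rw [if_pos hv] at hpc
        injection hpc with hpc
        obtain ⟨rfl, rfl, rfl⟩ : pk = k ∧ pv = bv ∧ w = mv := by
          injection hpc with h1 h2; injection h2 with h2 h3; exact ⟨h1, h2, h3⟩
        obtain ⟨hkb, hdb⟩ := (pvGetSome_iff bhs pk pv).mp hgb
        obtain ⟨hkm, hdm⟩ := (pvGetSome_iff mhs pk w).mp hg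
        refine ⟨pk, ?_, by rw [hdb, hdm]⟩
        rw [PySem.List.mem_sorted, List.mem_filter, PySem.Set.mem_inter, PySem.Set.mem_ofList, PySem.Set.mem_ofList]
        refine ⟨⟨hkb, hkm⟩, ?_⟩
        rw [hdb, hdm]
        exact hv
      · rw [if_neg hv] at hpc; cases hpc
  · rintro ⟨k', hk', hkv⟩
    cases hkv
    rw [PySem.List.mem_sorted, List.mem_filter, PySem.Set.mem_inter, PySem.Set.mem_ofList, PySem.Set.mem_ofList] at hk'
    obtain ⟨⟨hkb, hkm⟩, hne⟩ := hk'
    refine ⟨(k, (pvToMap bhs).getD k ""), (pvLatestItems_mem bhs k _).mpr ((pvGetSome_iff bhs k _).mpr ⟨hkb, rfl⟩), ?_⟩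
    unfold pvChg
    rw [pvFind_eq mhs k]
    cases hg : (pvToMap mhs).get? k with
    | none => exact absurd ((PySem.Dict.get?_eq_none_iff_not_mem_keys _ _).mp hg) (not_not.mpr hkm)
    | some w =>
      have hdm : (pvToMap mhs).getD k "" = w := PySem.Dict.getD_of_get?_eq_some _ _ hg
      simp only [Option.map_some]
      rw [if_pos (by rw [hdm] at hne; exact hne)]
      rw [hdm]

lemma pvJoinNil (sep : String) : PySem.Str.join sep ([] : List String) = "" := rfl

lemma pvFormat_eq (added removed changed : List String) (bm mm : PySem.Dict String String) :
    (let cap := fun (keys : List String) => (keys.map pyTitle).take 6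
     let chips : List String := []
     let chips := if added.isEmpty then chips else chips ++ ["+" ++ PySem.Str.join "," (cap added)]
     let chips := if removed.isEmpty then chips else chips ++ ["-" ++ PySem.Str.join "," (cap removed)]
     let chips := if changed.isEmpty then chips else chips ++ ["~" ++ PySem.Str.join "," (cap changed)]
     let summary := if chips.isEmpty then "-" else PySem.Str.join " " chips
     let tip : List String := []
     let tip := if added.isEmpty then tip else tip ++ ["Added:"] ++ added.map (fun k => "  " ++ k ++ ": " ++ mm.getD k "")
     let tip := if removed.isEmpty then tip else tip ++ ["Removed:"] ++ removed.map (fun k => "  " ++ k ++ ": " ++ bm.getD k "")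
     let tip := if changed.isEmpty then tip else tip ++ ["Changed:"] ++ changed.map (fun k => "  " ++ k ++ ": '" ++ bm.getD k "" ++ "' -> '" ++ mm.getD k "" ++ "'")
     let tooltip := if tip.isEmpty then "" else PySem.Str.join "\n" tip
     ((summary, tooltip) : String × String))
    =
    (let added' := added.map (fun k => (k, mm.getD k ""))
     let removed' := removed.map (fun k => (k, bm.getD k ""))
     let changed' := changed.map (fun k => (k, bm.getD k "", mm.getD k ""))
     let chips : List String := []
     let chips := if added'.isEmpty then chips else chips ++ ["+" ++ PySem.Str.join "," ((added'.take 6).map (fun p => pyTitle p.1))]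
     let chips := if removed'.isEmpty then chips else chips ++ ["-" ++ PySem.Str.join "," ((removed'.take 6).map (fun p => pyTitle p.1))]
     let chips := if changed'.isEmpty then chips else chips ++ ["~" ++ PySem.Str.join "," ((changed'.take 6).map (fun t => pyTitle t.1))]
     let tips : List String := []
     let tips := if added'.isEmpty then tips else tips ++ ["Added:"] ++ added'.map (fun p => "  " ++ p.1 ++ ": " ++ p.2)
     let tips := if removed'.isEmpty then tips else tips ++ ["Removed:"] ++ removed'.map (fun p => "  " ++ p.1 ++ ": " ++ p.2)
     let tips := if changed'.isEmpty then tips else tips ++ ["Changed:"] ++ changed'.map (fun t => "  " ++ t.1 ++ ": '" ++ t.2.1 ++ "' -> '" ++ t.2.2 ++ "'")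
     ((if chips.isEmpty then "-" else PySem.Str.join " " chips, PySem.Str.join "\n" tips) : String × String)) := by
  rcases added with _ | ⟨a0, at'⟩ <;> rcases removed with _ | ⟨r0, rt⟩ <;>
    rcases changed with _ | ⟨c0, ct⟩ <;>
    simp [← List.map_take, List.map_map, Function.comp_def, pvJoinNil]

-- ===== VERDICT (by name: the statement is the Claim_ definition above) =====
theorem header_diff_summary_py_spec : Claim_equal_header_diff_summary_py := by
  intro bh mh _
  unfold Spec_header_diff_summary_py
  show header_diff_summary_py bh mh = header_diff_summary_py_alt bh mh
  simp only [header_diff_summary_py, header_diff_summary_py_alt]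
  rw [pvMerge_spec _ _ (pvLatestItems_pairwise _) (pvLatestItems_pairwise _)]
  rw [pvComp_added, pvComp_removed, pvComp_changed]
  exact pvFormat_eq _ _ _ _ _
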